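-- pv_equiv track=rewrite | github.com/OZOOOOOH/colon_compare | src/utils/__init__.py | vote_results
-- ===== SOURCE A (Python) =====
-- from typing import List, Sequence
--
-- def calculate_score(n, r, class_score):
--     if r == 0:  # bigger
--         for idx in range(n + 1, 4):
--             class_score[idx] += 1
--     elif r == 1:  # same
--         class_score[n] += 1
--     else:  # smaller
--         for idx in range(n):
--             class_score[idx] += 1
--     return class_score
--
-- def vote_results(results: List):
--     class_score = [0] * 4
--     # class_score[4] is other case
--     for r0, r1, r2, r3 in zip(results[0], results[1], results[2], results[3]):
--         class_score = calculate_score(0, r0, class_score)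
--         class_score = calculate_score(1, r1, class_score)
--         class_score = calculate_score(2, r2, class_score)
--         class_score = calculate_score(3, r3, class_score)
--
--     return class_score
-- ===== SOURCE B (Python) =====
-- from typing import List
--
--
-- def vote_results(results: List):
--     # Count, per comparison position n, how many rows say "same" (== 1) and how
--     # many say "bigger" (== 0); everything else counts as "smaller".  The final
--     # score of class idx is then a closed formula over those column counts.
--     rows = list(zip(results[0], results[1], results[2], results[3]))
--     m = len(rows)
--     c0 = [sum(1 for row in rows if row[n] == 0) for n in range(4)]
--     c1 = [sum(1 for row in rows if row[n] == 1) for n in range(4)]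
--     return [sum(c0[:idx]) + c1[idx] + sum(m - c0[n] - c1[n] for n in range(idx + 1, 4))
--             for idx in range(4)]
-- ===== Notes on version B (the rewrite author's own statement) =====
-- stated objective: alternative
-- what changed: B replaces A's per-row, per-class increment loops (calculate_score called four times per row, mutating a running score list) by a column-count pass (how many rows say 0/'bigger' and 1/'same' per position) followed by a closed formula combining those eight counts into the four class scores.
import Mathlib
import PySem

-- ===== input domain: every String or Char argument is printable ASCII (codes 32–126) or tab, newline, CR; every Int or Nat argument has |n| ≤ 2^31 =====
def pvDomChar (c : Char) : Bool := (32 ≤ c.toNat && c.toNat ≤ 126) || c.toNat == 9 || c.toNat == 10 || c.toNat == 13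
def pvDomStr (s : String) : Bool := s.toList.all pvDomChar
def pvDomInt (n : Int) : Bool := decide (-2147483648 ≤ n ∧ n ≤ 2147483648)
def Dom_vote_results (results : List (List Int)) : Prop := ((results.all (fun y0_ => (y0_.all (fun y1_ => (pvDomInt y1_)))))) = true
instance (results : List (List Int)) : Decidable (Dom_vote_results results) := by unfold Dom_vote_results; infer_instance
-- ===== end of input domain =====

-- B replaces A's per-row increment loops by per-column counts of 0/'bigger' and
-- 1/'same' votes combined by a closed formula (objective: alternative decomposition).

-- ===== PORT A =====
-- zip(results[0], results[1], results[2], results[3])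
def pvZip4 : List Int → List Int → List Int → List Int → List (Int × Int × Int × Int)
  | a :: as, b :: bs, c :: cs, d :: ds => (a, b, c, d) :: pvZip4 as bs cs ds
  | _, _, _, _ => []

-- class_score[idx] += 1  (idx is always 0..3, in range for the length-4 list)
def pvInc (cs : List Int) (i : Nat) : List Int := cs.set i (cs.getD i 0 + 1)

def calculate_score (n : Int) (r : Int) (cs : List Int) : List Int :=
  if r = 0 then (PySem.List.pyRange (n + 1) 4 1).foldl (fun c idx => pvInc c idx.toNat) cs
  else if r = 1 then pvInc cs n.toNat
  else (PySem.List.pyRange 0 n 1).foldl (fun c idx => pvInc c idx.toNat) cs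

-- A indexes results[0]..results[3]; with fewer than 4 lists Python raises
-- IndexError, which Pre_vote_results excludes, so the `| _` arm is unreachable.
def vote_results (results : List (List Int)) : List Int :=
  match results with
  | r0s :: r1s :: r2s :: r3s :: _ =>
    (pvZip4 r0s r1s r2s r3s).foldl
      (fun cs row =>
        calculate_score 3 row.2.2.2
          (calculate_score 2 row.2.2.1
            (calculate_score 1 row.2.1
              (calculate_score 0 row.1 cs))))
      [0, 0, 0, 0]
  | _ => []

-- ===== PORT B =====
-- row[n] for the zipped 4-tuple
def pvProj (row : Int × Int × Int × Int) : Nat → Int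
  | 0 => row.1
  | 1 => row.2.1
  | 2 => row.2.2.1
  | _ => row.2.2.2

-- B indexes results[0]..results[3] the same way; IndexError excluded by Pre_.
def vote_results_alt (results : List (List Int)) : List Int :=
  match results with
  | r0s :: r1s :: r2s :: r3s :: _ =>
    let rows := pvZip4 r0s r1s r2s r3s
    let m : Int := rows.length
    let c0 : List Int :=
      (List.range 4).map (fun n => ((rows.filter (fun row => pvProj row n == 0)).length : Int))
    let c1 : List Int :=
      (List.range 4).map (fun n => ((rows.filter (fun row => pvProj row n == 1)).length : Int))
    (List.range 4).map (fun idx =>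
      (c0.take idx).sum + c1.getD idx 0 +
        ((PySem.List.pyRange (idx + 1) 4 1).map
          (fun n => m - c0.getD n.toNat 0 - c1.getD n.toNat 0)).sum)
  | _ => []

-- ===== PRECONDITION & SPEC =====
-- Pre_ excludes inputs with fewer than 4 result lists, on which A raises IndexError.
def Pre_vote_results (results : List (List Int)) : Prop := 4 ≤ results.length
instance (results : List (List Int)) : Decidable (Pre_vote_results results) := by
  unfold Pre_vote_results; infer_instance

def pvWitness_vote_results : List (List Int) := [[0, 1], [1, 2], [2, 0], [1, 1]]

def Spec_vote_results (results : List (List Int)) (out : List Int) : Prop := out = vote_results_alt results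
instance (results : List (List Int)) (out : List Int) : Decidable (Spec_vote_results results out) := by unfold Spec_vote_results; infer_instance

-- ===== CLAIM (what is proved, stated in full; the proofs are below) =====
def Claim_equal_vote_results : Prop := ∀ (results : List (List Int)), Dom_vote_results results → Pre_vote_results results → Spec_vote_results results (vote_results results)

-- ===== LEMMAS AND PROOFS =====

def pvB (b : Bool) : Int := if b then 1 else 0

lemma pv_cs0 (r a b c d : Int) :
    calculate_score 0 r [a, b, c, d]
      = [a + pvB (r == 1), b + pvB (r == 0), c + pvB (r == 0), d + pvB (r == 0)] := by
  have h1 : PySem.List.pyRange (0 + 1) 4 1 = [1, 2, 3] := by decide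
  have h2 : PySem.List.pyRange 0 0 1 = [] := by decide
  unfold calculate_score
  split_ifs <;> simp_all [h1, h2, pvInc, pvB]

lemma pv_cs1 (r a b c d : Int) :
    calculate_score 1 r [a, b, c, d]
      = [a + pvB (!(r == 0) && !(r == 1)), b + pvB (r == 1), c + pvB (r == 0), d + pvB (r == 0)] := by
  have h1 : PySem.List.pyRange (1 + 1) 4 1 = [2, 3] := by decide
  have h2 : PySem.List.pyRange 0 1 1 = [0] := by decide
  unfold calculate_score
  split_ifs <;> simp_all [h1, h2, pvInc, pvB]

lemma pv_cs2 (r a b c d : Int) :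
    calculate_score 2 r [a, b, c, d]
      = [a + pvB (!(r == 0) && !(r == 1)), b + pvB (!(r == 0) && !(r == 1)), c + pvB (r == 1),
         d + pvB (r == 0)] := by
  have h1 : PySem.List.pyRange (2 + 1) 4 1 = [3] := by decide
  have h2 : PySem.List.pyRange 0 2 1 = [0, 1] := by decide
  unfold calculate_score
  split_ifs <;> simp_all [h1, h2, pvInc, pvB]

lemma pv_cs3 (r a b c d : Int) :
    calculate_score 3 r [a, b, c, d]
      = [a + pvB (!(r == 0) && !(r == 1)), b + pvB (!(r == 0) && !(r == 1)), c + pvB (!(r == 0) && !(r == 1)),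
         d + pvB (r == 1)] := by
  have h1 : PySem.List.pyRange (3 + 1) 4 1 = [] := by decide
  have h2 : PySem.List.pyRange 0 3 1 = [0, 1, 2] := by decide
  unfold calculate_score
  split_ifs <;> simp_all [h1, h2, pvInc, pvB]

lemma pv_step_eq (a b c d : Int) (row : Int × Int × Int × Int) :
    calculate_score 3 row.2.2.2
        (calculate_score 2 row.2.2.1
          (calculate_score 1 row.2.1
            (calculate_score 0 row.1 [a, b, c, d])))
      = [a + (pvB (pvProj row 0 == 1) + pvB (!(pvProj row 1 == 0) && !(pvProj row 1 == 1)) +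
             pvB (!(pvProj row 2 == 0) && !(pvProj row 2 == 1)) + pvB (!(pvProj row 3 == 0) && !(pvProj row 3 == 1))),
         b + (pvB (pvProj row 0 == 0) + pvB (pvProj row 1 == 1) +
             pvB (!(pvProj row 2 == 0) && !(pvProj row 2 == 1)) + pvB (!(pvProj row 3 == 0) && !(pvProj row 3 == 1))),
         c + (pvB (pvProj row 0 == 0) + pvB (pvProj row 1 == 0) +
             pvB (pvProj row 2 == 1) + pvB (!(pvProj row 3 == 0) && !(pvProj row 3 == 1))),
         d + (pvB (pvProj row 0 == 0) + pvB (pvProj row 1 == 0) +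
             pvB (pvProj row 2 == 0) + pvB (pvProj row 3 == 1))] := by
  obtain ⟨r0, r1, r2, r3⟩ := row
  rw [pv_cs0, pv_cs1, pv_cs2, pv_cs3]
  simp only [pvProj, List.cons.injEq, and_true]
  refine ⟨?_, ?_, ?_, ?_⟩ <;> ring

lemma pv_foldA (rows : List (Int × Int × Int × Int)) :
    ∀ (a b c d : Int),
      rows.foldl
          (fun cs row =>
            calculate_score 3 row.2.2.2
              (calculate_score 2 row.2.2.1
                (calculate_score 1 row.2.1
                  (calculate_score 0 row.1 cs))))
          [a, b, c, d]
        = [a + (rows.map (fun row => pvB (pvProj row 0 == 1) + pvB (!(pvProj row 1 == 0) && !(pvProj row 1 == 1)) +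
             pvB (!(pvProj row 2 == 0) && !(pvProj row 2 == 1)) + pvB (!(pvProj row 3 == 0) && !(pvProj row 3 == 1)))).sum,
           b + (rows.map (fun row => pvB (pvProj row 0 == 0) + pvB (pvProj row 1 == 1) +
             pvB (!(pvProj row 2 == 0) && !(pvProj row 2 == 1)) + pvB (!(pvProj row 3 == 0) && !(pvProj row 3 == 1)))).sum,
           c + (rows.map (fun row => pvB (pvProj row 0 == 0) + pvB (pvProj row 1 == 0) +
             pvB (pvProj row 2 == 1) + pvB (!(pvProj row 3 == 0) && !(pvProj row 3 == 1)))).sum,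
           d + (rows.map (fun row => pvB (pvProj row 0 == 0) + pvB (pvProj row 1 == 0) +
             pvB (pvProj row 2 == 0) + pvB (pvProj row 3 == 1))).sum] := by
  induction rows with
  | nil => intro a b c d; simp
  | cons row rows ih =>
    intro a b c d
    simp only [List.foldl_cons, pv_step_eq, List.map_cons, List.sum_cons, ih, add_assoc]

-- per-column count facts
lemma pv_sum_ind_eq_cnt (rows : List (Int × Int × Int × Int)) (n : Nat) (v : Int) :
    (rows.map (fun row => pvB (pvProj row n == v))).sum
      = ((rows.filter (fun row => pvProj row n == v)).length : Int) := by
  induction rows with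
  | nil => simp
  | cons row rows ih =>
    rw [List.map_cons, List.sum_cons, ih, List.filter_cons]
    by_cases h : pvProj row n = v <;> simp [h, pvB] <;> push_cast <;> omega

lemma pv_sum_else (rows : List (Int × Int × Int × Int)) (n : Nat) :
    (rows.map (fun row => pvB (!(pvProj row n == 0) && !(pvProj row n == 1)))).sum
      = (rows.length : Int)
        - ((rows.filter (fun row => pvProj row n == 0)).length : Int)
        - ((rows.filter (fun row => pvProj row n == 1)).length : Int) := by
  induction rows with
  | nil => simp
  | cons row rows ih =>
    rw [List.map_cons, List.sum_cons, ih, List.filter_cons, List.filter_cons, List.length_cons]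
    by_cases h0 : pvProj row n = 0 <;> by_cases h1 : pvProj row n = 1 <;>
      simp [h0, h1, pvB] <;> push_cast <;> omega

set_option maxHeartbeats 1000000 in
lemma pv_rows_eq (rows : List (Int × Int × Int × Int)) :
    rows.foldl
        (fun cs row =>
          calculate_score 3 row.2.2.2
            (calculate_score 2 row.2.2.1
              (calculate_score 1 row.2.1
                (calculate_score 0 row.1 cs))))
        [0, 0, 0, 0]
      = (let m : Int := rows.length
         let c0 : List Int :=
           (List.range 4).map (fun n => ((rows.filter (fun row => pvProj row n == 0)).length : Int))
         let c1 : List Int :=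
           (List.range 4).map (fun n => ((rows.filter (fun row => pvProj row n == 1)).length : Int))
         (List.range 4).map (fun idx =>
           (c0.take idx).sum + c1.getD idx 0 +
             ((PySem.List.pyRange (idx + 1) 4 1).map
               (fun n => m - c0.getD n.toNat 0 - c1.getD n.toNat 0)).sum)) := by
  rw [pv_foldA]
  have hr : List.range 4 = [0, 1, 2, 3] := by decide
  simp only [hr, List.map_cons, List.map_nil]
  norm_num
  simp only [pv_sum_ind_eq_cnt, pv_sum_else]
  have h1 : PySem.List.pyRange 1 4 1 = [1, 2, 3] := by decide
  have h2 : PySem.List.pyRange 2 4 1 = [2, 3] := by decide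
  have h3 : PySem.List.pyRange 3 4 1 = [3] := by decide
  have h4 : PySem.List.pyRange 4 4 1 = [] := by decide
  have t1 : (1 : Int).toNat = 1 := rfl
  have t2 : (2 : Int).toNat = 2 := rfl
  have t3 : (3 : Int).toNat = 3 := rfl
  have k0 : ∀ (a b c d : Int), ([a, b, c, d][0]?).getD 0 = a := fun _ _ _ _ => rfl
  have k1 : ∀ (a b c d : Int), ([a, b, c, d][1]?).getD 0 = b := fun _ _ _ _ => rfl
  have k2 : ∀ (a b c d : Int), ([a, b, c, d][2]?).getD 0 = c := fun _ _ _ _ => rfl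
  have k3 : ∀ (a b c d : Int), ([a, b, c, d][3]?).getD 0 = d := fun _ _ _ _ => rfl
  simp only [h1, h2, h3, h4, t1, t2, t3, k0, k1, k2, k3, List.map_cons,
    List.map_nil, List.sum_cons, List.sum_nil]
  refine ⟨by ring, by ring, by ring, by ring⟩

-- ===== VERDICT (by name: the statement is the Claim_ definition above) =====
theorem vote_results_spec : Claim_equal_vote_results := by
  intro results _ hpre
  unfold Spec_vote_results
  match results with
  | r0s :: r1s :: r2s :: r3s :: rest =>
    show vote_results _ = vote_results_alt _
    unfold vote_results vote_results_alt
    exact pv_rows_eq (pvZip4 r0s r1s r2s r3s)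
  | [] => simp [Pre_vote_results] at hpre
  | [_] => simp [Pre_vote_results] at hpre
  | [_, _] => simp [Pre_vote_results] at hpre
  | [_, _, _] => simp [Pre_vote_results] at hpre
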